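-- pv_equiv track=rewrite | github.com/ribalda/everybodycodes | 2025/11/step1_2_3.py | ducks_settle_fast
-- ===== SOURCE A (Python) =====
-- from itertools import pairwise
--
-- def phaseNone(ducks):
--     return phaseNone, ducks
--
-- def phase1(ducks):
--     done = True
--     for i in range(len(ducks) - 1):
--         if ducks[i + 1] < ducks[i]:
--             ducks[i + 1] += 1
--             ducks[i] -= 1
--             done = False
--     if done:
--         return phase2(ducks)
--     return phase1, ducks
--
-- def phase2(ducks):
--     done = True
--     for i in range(len(ducks) - 1):
--         if ducks[i + 1] > ducks[i]:
--             ducks[i] += 1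
--             ducks[i + 1] -= 1
--             done = False
--
--     if done:
--         return phaseNone(ducks)
--     return phase2, ducks
--
-- def ducks_settle(ducks, endphase=phaseNone):
--     ducks = ducks.copy()
--     phase = phase1
--     out = 0
--     while phase != endphase:
--         out += 1
--         phase, ducks = phase(ducks)
--     return out - 1
--
-- def ducks_settle_fast(ducks):
--
--     # Calculate steps with old method
--     steps = ducks_settle(ducks, phase2)
--
--     # Move with fast... not good for calculating steps
--     ducks = ducks.copy()
--     done = False
--     while not done:
--         done = True
--         for a, b in pairwise(range(len(ducks))):
--             if ducks[a] > ducks[b]: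
--                 diff_2 = (ducks[a] - ducks[b] + 1) // 2
--                 ducks[b] += diff_2
--                 ducks[a] -= diff_2
--                 done = False
--
--     done = False
--     movs = [0] * len(ducks)
--     while not done:
--         done = True
--         for a, b in pairwise(range(len(ducks))):
--             if ducks[a] < ducks[b]:
--                 diff_2 = (ducks[b] - ducks[a] + 1) // 2
--                 ducks[b] -= diff_2
--                 ducks[a] += diff_2
--                 movs[a] += diff_2
--                 done = False
--
--     steps += max(movs)
--     return steps
-- ===== SOURCE B (Python) =====
-- # B: works entirely on the prefix-sum vector instead of the duck values.
-- # Each smoothing pass becomes a left-to-right clamping scan on prefix sums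
-- # (up: midpoint-floor min-clamp, down: midpoint-ceil max-clamp, phase-1:
-- # decrement where the prefix exceeds the floor-midpoint of its neighbours),
-- # loops stop on a fixed point (list equality), and the per-position `movs`
-- # accumulator disappears: the leftward flow across an edge equals the change
-- # of the prefix sum there, so max(movs) = max(D[k] - U[k]).
--
-- def _prefix(ducks):
--     P = [0]
--     for v in ducks:
--         P.append(P[-1] + v)
--     return P
--
-- def _scan1(P):
--     Q = [P[0]] if P else []
--     for k in range(1, len(P) - 1):
--         Q.append(P[k] - 1 if Q[k - 1] + P[k + 1] < 2 * P[k] else P[k])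
--     if len(P) > 1:
--         Q.append(P[-1])
--     return Q
--
-- def _scan_up(P):
--     Q = [P[0]] if P else []
--     for k in range(1, len(P) - 1):
--         Q.append(min(P[k], (Q[k - 1] + P[k + 1]) // 2))
--     if len(P) > 1:
--         Q.append(P[-1])
--     return Q
--
-- def _scan_down(P):
--     Q = [P[0]] if P else []
--     for k in range(1, len(P) - 1):
--         Q.append(max(P[k], -((-(Q[k - 1] + P[k + 1])) // 2)))
--     if len(P) > 1:
--         Q.append(P[-1])
--     return Q
--
-- def _fixpoint(scan, P):
--     while True:
--         Q = scan(P)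
--         if Q == P:
--             return P
--         P = Q
--
-- def ducks_settle_fast(ducks):
--     P = _prefix(ducks)
--
--     # phase-1 pass count: iterate the scan, counting passes that change P
--     steps = 0
--     while True:
--         Q = _scan1(P)
--         if Q == P:
--             break
--         P = Q
--         steps += 1
--
--     # fast halves, still on prefix sums, restarted from the input
--     U = _fixpoint(_scan_up, _prefix(ducks))
--     D = _fixpoint(_scan_down, U)
--
--     return steps + max(D[k] - U[k] for k in range(1, len(ducks) + 1))
-- ===== Notes on version B (the rewrite author's own statement) =====
-- stated objective: alternative
-- what changed: B abandons the duck-value representation entirely: it converts the input once to its prefix-sum vector and runs every phase there - the halving passes become left-to-right midpoint-clamping scans (min with floor-midpoint of the neighbours going up, max with ceil-midpoint going down), the phase-1 pass a decrement-where-above-floor-midpoint scan, loops stop on a fixed point detected by list equality instead of a moved flag, and the per-position movs accumulator disappears by conservation: the leftward flow across edge k equals the growth of prefix sum k, so max(movs) = max_k(D[k]-U[k]); …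
import Mathlib
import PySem

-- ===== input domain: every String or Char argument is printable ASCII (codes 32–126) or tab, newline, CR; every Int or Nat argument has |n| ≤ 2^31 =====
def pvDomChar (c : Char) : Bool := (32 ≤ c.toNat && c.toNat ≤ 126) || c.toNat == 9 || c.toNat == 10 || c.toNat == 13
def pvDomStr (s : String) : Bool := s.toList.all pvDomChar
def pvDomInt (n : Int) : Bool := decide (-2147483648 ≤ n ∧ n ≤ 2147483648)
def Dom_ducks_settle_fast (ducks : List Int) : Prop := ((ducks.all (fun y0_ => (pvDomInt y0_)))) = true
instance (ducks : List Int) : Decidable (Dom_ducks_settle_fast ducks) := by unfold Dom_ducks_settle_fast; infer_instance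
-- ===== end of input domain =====

-- B re-implements A on the prefix-sum vector: every smoothing pass becomes a
-- midpoint-clamping scan on prefix sums, loops stop on a list-equality fixed point,
-- and the movs accumulator is replaced by the prefix-sum difference max(D[k]-U[k]);
-- equal return value is proved on Pre_, which excludes exactly the inputs on which
-- A's while loop never terminates.

-- Fuel for the while loops (loop infrastructure only: every moving pass strictly moves
-- an integer potential confined to a window of this size, so on the admitted inputs the
-- loops settle long before the fuel runs out; the proofs below never rely on that).
def pvFuelAbs (d : List Int) : Nat := d.foldl (fun s x => max s x.natAbs) 0
def pvFuel (d : List Int) : Nat := d.length * d.length * (2 * pvFuelAbs d + 2) + 2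

-- ===== PORT A =====
-- Python's phase functions are first-class values re-dispatched by a trampoline;
-- ported as tags with one dispatcher.
inductive Ph | pnone | p1 | p2
deriving DecidableEq

-- body of phase1's `for i in range(len(ducks) - 1)` (indices are in range, so getD/set are exact)
def pvStep1 (s : List Int × Bool) (i : Nat) : List Int × Bool :=
  if s.1.getD (i+1) 0 < s.1.getD i 0 then
    ((s.1.set (i+1) (s.1.getD (i+1) 0 + 1)).set i (s.1.getD i 0 - 1), false)
  else s

def pvPass1A (d : List Int) : List Int × Bool :=
  (List.range (d.length - 1)).foldl pvStep1 (d, true)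

-- body of phase2's loop
def pvStep2 (s : List Int × Bool) (i : Nat) : List Int × Bool :=
  if s.1.getD (i+1) 0 > s.1.getD i 0 then
    ((s.1.set i (s.1.getD i 0 + 1)).set (i+1) (s.1.getD (i+1) 0 - 1), false)
  else s

def pvPass2A (d : List Int) : List Int × Bool :=
  (List.range (d.length - 1)).foldl pvStep2 (d, true)

-- phaseNone / phase1 / phase2 (each returns the next phase and the ducks)
def pvStepA : Ph → List Int → Ph × List Int
  | Ph.pnone, d => (Ph.pnone, d)
  | Ph.p1, d =>
      let r := pvPass1A d
      if r.2 then
        let r2 := pvPass2A r.1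
        if r2.2 then (Ph.pnone, r2.1) else (Ph.p2, r2.1)
      else (Ph.p1, r.1)
  | Ph.p2, d =>
      let r := pvPass2A d
      if r.2 then (Ph.pnone, r.1) else (Ph.p2, r.1)

-- `while phase != endphase: out += 1; phase, ducks = phase(ducks)`; on fuel exhaustion
-- (= Python divergence, excluded by Pre_) it returns out - 1 like the loop exit
def pvLoopA : Ph → Nat → Ph → List Int → Int → Int
  | _,     0,   _,  _, out => out - 1
  | endph, f+1, ph, d, out =>
      if ph = endph then out - 1
      else
        let s := pvStepA ph d
        pvLoopA endph f s.1 s.2 (out + 1)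

def pvDucksSettleA (ducks : List Int) (endph : Ph) : Int :=
  pvLoopA endph (pvFuel ducks + 1) Ph.p1 ducks 0

-- fast upward halving pass: `for a, b in pairwise(range(len(ducks)))` (b = a+1)
def pvStepU (s : List Int × Bool) (a : Nat) : List Int × Bool :=
  if s.1.getD a 0 > s.1.getD (a+1) 0 then
    let diff := PySem.Int.floordiv (s.1.getD a 0 - s.1.getD (a+1) 0 + 1) 2
    ((s.1.set (a+1) (s.1.getD (a+1) 0 + diff)).set a (s.1.getD a 0 - diff), false)
  else s

def pvPassUpA (d : List Int) : List Int × Bool :=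
  (List.range (d.length - 1)).foldl pvStepU (d, true)

def pvLoopUpA : Nat → List Int → List Int
  | 0, d => d
  | f+1, d =>
      let r := pvPassUpA d
      if r.2 then r.1 else pvLoopUpA f r.1

-- fast downward halving pass, also accumulating movs[a]
def pvStepD (s : List Int × (List Int × Bool)) (a : Nat) : List Int × (List Int × Bool) :=
  if s.1.getD a 0 < s.1.getD (a+1) 0 then
    let diff := PySem.Int.floordiv (s.1.getD (a+1) 0 - s.1.getD a 0 + 1) 2
    ((s.1.set (a+1) (s.1.getD (a+1) 0 - diff)).set a (s.1.getD a 0 + diff),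
     (s.2.1.set a (s.2.1.getD a 0 + diff), false))
  else s

def pvPassDownA (d m : List Int) : List Int × (List Int × Bool) :=
  (List.range (d.length - 1)).foldl pvStepD (d, (m, true))

def pvLoopDownA : Nat → List Int → List Int → List Int × List Int
  | 0, d, m => (d, m)
  | f+1, d, m =>
      let r := pvPassDownA d m
      if r.2.2 then (r.1, r.2.1) else pvLoopDownA f r.1 r.2.1

def ducks_settle_fast (ducks : List Int) : Int :=
  let steps := pvDucksSettleA ducks Ph.p2
  let d1 := pvLoopUpA (pvFuel ducks) ducks
  let r := pvLoopDownA (pvFuel ducks) d1 (List.replicate d1.length 0)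
  -- max(movs): movs is nonempty on every input Pre_ admits (length ≥ 2)
  steps + (PySem.List.max? r.2 (fun y => y)).getD 0

-- ===== PORT B =====
-- Source B _prefix without its leading 0: partial sums of the list on top of base s
def pvPSum : Int → List Int → List Int
  | _, [] => []
  | s, v :: t => (s + v) :: pvPSum (s + v) t

-- Source B _scan1 (q carries Q[k-1]; the trailing singleton is P[n], copied)
def pvScan1Aux : Int → List Int → List Int
  | _, [] => []
  | _, [p] => [p]
  | q, p :: p' :: t =>
      let o := if q + p' < 2 * p then p - 1 else p
      o :: pvScan1Aux o (p' :: t)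

def pvScan1 : List Int → List Int
  | [] => []
  | p :: t => p :: pvScan1Aux p t

-- Source B _scan_up: Q[k] = min(P[k], (Q[k-1]+P[k+1]) // 2)
def pvScanUpAux : Int → List Int → List Int
  | _, [] => []
  | _, [p] => [p]
  | q, p :: p' :: t =>
      let o := min p (PySem.Int.floordiv (q + p') 2)
      o :: pvScanUpAux o (p' :: t)

def pvScanUp : List Int → List Int
  | [] => []
  | p :: t => p :: pvScanUpAux p t

-- Source B _scan_down: Q[k] = max(P[k], -((-(Q[k-1]+P[k+1])) // 2))
def pvScanDownAux : Int → List Int → List Int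
  | _, [] => []
  | _, [p] => [p]
  | q, p :: p' :: t =>
      let o := max p (-(PySem.Int.floordiv (-(q + p')) 2))
      o :: pvScanDownAux o (p' :: t)

def pvScanDown : List Int → List Int
  | [] => []
  | p :: t => p :: pvScanDownAux p t

-- the phase-1 counting loop: `Q = _scan1(P); if Q == P: break; P = Q; steps += 1`
def pvCountP : Nat → List Int → Int → Int
  | 0, _, steps => steps
  | f+1, P, steps =>
      let Q := pvScan1 P
      if Q = P then steps else pvCountP f Q (steps + 1)

-- Source B _fixpoint for _scan_up / _scan_down
def pvFixUp : Nat → List Int → List Int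
  | 0, P => P
  | f+1, P =>
      let Q := pvScanUp P
      if Q = P then P else pvFixUp f Q

def pvFixDown : Nat → List Int → List Int
  | 0, P => P
  | f+1, P =>
      let Q := pvScanDown P
      if Q = P then P else pvFixDown f Q

def ducks_settle_fast_alt (ducks : List Int) : Int :=
  let steps := pvCountP (pvFuel ducks) (0 :: pvPSum 0 ducks) 0
  let U := pvFixUp (pvFuel ducks) (0 :: pvPSum 0 ducks)
  let D := pvFixDown (pvFuel ducks) U
  -- max(D[k]-U[k] for k in 1..n): D and U have length n+1, so the zip of the tails
  -- ranges over exactly k = 1..n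
  steps + (PySem.List.max? (List.zipWith (fun a b => a - b) D.tail U.tail) (fun y => y)).getD 0

-- ===== PRECONDITION & SPEC =====
-- Pre_ excludes exactly the inputs on which A's while loop never terminates (phase1
-- smooths them to a constant list, after which phase2 hands control to phaseNone and
-- the trampoline spins forever): length < 2, or the sum divisible by the length with
-- every prefix sum at least k * average.
def Pre_ducks_settle_fast (ducks : List Int) : Prop :=
  2 ≤ ducks.length ∧
  ¬(((ducks.length : Int) ∣ ducks.sum) ∧
    ∀ k : Nat, k < ducks.length → (k : Int) * (ducks.sum / (ducks.length : Int)) ≤ (ducks.take k).sum)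

instance (ducks : List Int) : Decidable (Pre_ducks_settle_fast ducks) := by
  unfold Pre_ducks_settle_fast; infer_instance

def pvWitness_ducks_settle_fast : List Int := [1, 0]

def Spec_ducks_settle_fast (ducks : List Int) (out : Int) : Prop := out = ducks_settle_fast_alt ducks
instance (ducks : List Int) (out : Int) : Decidable (Spec_ducks_settle_fast ducks out) := by
  unfold Spec_ducks_settle_fast; infer_instance

-- ===== CLAIM (what is proved, stated in full; the proofs are below) =====
def Claim_equal_ducks_settle_fast : Prop := ∀ (ducks : List Int), Dom_ducks_settle_fast ducks → Pre_ducks_settle_fast ducks → Spec_ducks_settle_fast ducks (ducks_settle_fast ducks)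

-- ===== LEMMAS AND PROOFS =====

-- proof-side functional middle layer: each pass as a carry-passing recursion on values
def pvSmoothAux : Int → List Int → List Int × Bool
  | prev, [] => ([prev], false)
  | prev, v :: t =>
      if v < prev then
        let r := pvSmoothAux (v + 1) t
        ((prev - 1) :: r.1, true)
      else
        let r := pvSmoothAux v t
        (prev :: r.1, r.2)

def pvPassSmooth : List Int → List Int × Bool
  | [] => ([], false)
  | v :: t => pvSmoothAux v t

def pvCountF : Nat → List Int → Int → Int
  | 0, _, steps => steps
  | f+1, d, steps =>
      let r := pvPassSmooth d
      if r.2 then pvCountF f r.1 (steps + 1) else steps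

def pvUpAux : Int → List Int → List Int × Bool
  | prev, [] => ([prev], false)
  | prev, v :: t =>
      if prev > v then
        let diff := PySem.Int.floordiv (prev - v + 1) 2
        let r := pvUpAux (v + diff) t
        ((prev - diff) :: r.1, true)
      else
        let r := pvUpAux v t
        (prev :: r.1, r.2)

def pvPassUpF : List Int → List Int × Bool
  | [] => ([], false)
  | v :: t => pvUpAux v t

def pvLoopUpF : Nat → List Int → List Int
  | 0, d => d
  | f+1, d =>
      let r := pvPassUpF d
      if r.2 then pvLoopUpF f r.1 else r.1

def pvDownAux : Int × Int → List (Int × Int) → List (Int × Int) × Bool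
  | p, [] => ([p], false)
  | p, q :: t =>
      if p.1 < q.1 then
        let diff := PySem.Int.floordiv (q.1 - p.1 + 1) 2
        let r := pvDownAux (q.1 - diff, q.2) t
        ((p.1 + diff, p.2 + diff) :: r.1, true)
      else
        let r := pvDownAux q t
        (p :: r.1, r.2)

def pvPassDownF : List (Int × Int) → List (Int × Int) × Bool
  | [] => ([], false)
  | p :: t => pvDownAux p t

def pvLoopDownF : Nat → List (Int × Int) → List (Int × Int)
  | 0, p => p
  | f+1, p =>
      let r := pvPassDownF p
      if r.2 then pvLoopDownF f r.1 else r.1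

-- ---- indexed pass = functional pass, phase-1 ----
lemma pvStep1_cons (x : Int) (d : List Int) (b : Bool) (i : Nat) :
    pvStep1 (x :: d, b) (i+1) = (x :: (pvStep1 (d, b) i).1, (pvStep1 (d, b) i).2) := by
  simp only [pvStep1, List.getD_cons_succ, List.set_cons_succ]
  split_ifs <;> rfl

lemma pvStep1_shift (is : List Nat) : ∀ (x : Int) (d : List Int) (b : Bool),
    (is.map (· + 1)).foldl pvStep1 (x :: d, b) =
      (x :: (is.foldl pvStep1 (d, b)).1, (is.foldl pvStep1 (d, b)).2) := by
  induction is with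
  | nil => intro x d b; rfl
  | cons i is ih =>
      intro x d b
      simp only [List.map_cons, List.foldl_cons, pvStep1_cons]
      exact ih x (pvStep1 (d, b) i).1 (pvStep1 (d, b) i).2

lemma pvPass1_fold (rest : List Int) : ∀ (x : Int) (b : Bool),
    (List.range ((x :: rest).length - 1)).foldl pvStep1 (x :: rest, b) =
      ((pvSmoothAux x rest).1, b && !(pvSmoothAux x rest).2) := by
  induction rest with
  | nil => intro x b; simp [pvSmoothAux]
  | cons y t ih =>
      intro x b
      have hlen : (x :: y :: t).length - 1 = t.length + 1 := by simp
      rw [hlen, List.range_succ_eq_map]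
      simp only [List.foldl_cons]
      have h0 : pvStep1 (x :: y :: t, b) 0 =
          if y < x then ((x - 1) :: (y + 1) :: t, false) else (x :: y :: t, b) := by
        simp only [pvStep1]
        split_ifs <;> first | rfl | simp_all
      rw [h0]
      have hsucc : (List.range t.length).map Nat.succ = (List.range t.length).map (· + 1) := by
        simp
      by_cases hyx : y < x
      · simp only [if_pos hyx]
        rw [hsucc, pvStep1_shift]
        have h1 : (List.range t.length).foldl pvStep1 ((y + 1) :: t, false) =
            ((pvSmoothAux (y + 1) t).1, false && !(pvSmoothAux (y + 1) t).2) := by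
          have := ih (y + 1) false; simpa using this
        rw [h1]
        simp [pvSmoothAux, hyx]
      · simp only [if_neg hyx]
        rw [hsucc, pvStep1_shift]
        have h1 : (List.range t.length).foldl pvStep1 (y :: t, b) =
            ((pvSmoothAux y t).1, b && !(pvSmoothAux y t).2) := by
          have := ih y b; simpa using this
        rw [h1]
        simp [pvSmoothAux, hyx]

lemma pvPass1A_eq (d : List Int) : pvPass1A d = ((pvPassSmooth d).1, !(pvPassSmooth d).2) := by
  cases d with
  | nil => rfl
  | cons x rest =>
      have := pvPass1_fold rest x true
      simpa [pvPass1A, pvPassSmooth] using this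

-- ---- indexed pass = functional pass, up ----
lemma pvStepU_cons (x : Int) (d : List Int) (b : Bool) (i : Nat) :
    pvStepU (x :: d, b) (i+1) = (x :: (pvStepU (d, b) i).1, (pvStepU (d, b) i).2) := by
  simp only [pvStepU, List.getD_cons_succ, List.set_cons_succ]
  split_ifs <;> rfl

lemma pvStepU_shift (is : List Nat) : ∀ (x : Int) (d : List Int) (b : Bool),
    (is.map (· + 1)).foldl pvStepU (x :: d, b) =
      (x :: (is.foldl pvStepU (d, b)).1, (is.foldl pvStepU (d, b)).2) := by
  induction is with
  | nil => intro x d b; rfl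
  | cons i is ih =>
      intro x d b
      simp only [List.map_cons, List.foldl_cons, pvStepU_cons]
      exact ih x (pvStepU (d, b) i).1 (pvStepU (d, b) i).2

lemma pvPassUp_fold (rest : List Int) : ∀ (x : Int) (b : Bool),
    (List.range ((x :: rest).length - 1)).foldl pvStepU (x :: rest, b) =
      ((pvUpAux x rest).1, b && !(pvUpAux x rest).2) := by
  induction rest with
  | nil => intro x b; simp [pvUpAux]
  | cons y t ih =>
      intro x b
      have hlen : (x :: y :: t).length - 1 = t.length + 1 := by simp
      rw [hlen, List.range_succ_eq_map]
      simp only [List.foldl_cons]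
      have h0 : pvStepU (x :: y :: t, b) 0 =
          if x > y then
            ((x - PySem.Int.floordiv (x - y + 1) 2) :: (y + PySem.Int.floordiv (x - y + 1) 2) :: t, false)
          else (x :: y :: t, b) := by
        simp only [pvStepU]
        split_ifs <;> first | rfl | simp_all
      rw [h0]
      have hsucc : (List.range t.length).map Nat.succ = (List.range t.length).map (· + 1) := by
        simp
      by_cases hyx : x > y
      · simp only [if_pos hyx]
        rw [hsucc, pvStepU_shift]
        have h1 : (List.range t.length).foldl pvStepU ((y + PySem.Int.floordiv (x - y + 1) 2) :: t, false) =
            ((pvUpAux (y + PySem.Int.floordiv (x - y + 1) 2) t).1,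
              false && !(pvUpAux (y + PySem.Int.floordiv (x - y + 1) 2) t).2) := by
          have := ih (y + PySem.Int.floordiv (x - y + 1) 2) false; simpa using this
        rw [h1]
        simp [pvUpAux, hyx]
      · simp only [if_neg hyx]
        rw [hsucc, pvStepU_shift]
        have h1 : (List.range t.length).foldl pvStepU (y :: t, b) =
            ((pvUpAux y t).1, b && !(pvUpAux y t).2) := by
          have := ih y b; simpa using this
        rw [h1]
        simp [pvUpAux, hyx]

lemma pvPassUpA_eq (d : List Int) : pvPassUpA d = ((pvPassUpF d).1, !(pvPassUpF d).2) := by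
  cases d with
  | nil => rfl
  | cons x rest =>
      have := pvPassUp_fold rest x true
      simpa [pvPassUpA, pvPassUpF] using this

lemma pvLoopUp_eq : ∀ (f : Nat) (d : List Int), pvLoopUpA f d = pvLoopUpF f d := by
  intro f
  induction f with
  | zero => intro d; rfl
  | succ f ih =>
      intro d
      simp only [pvLoopUpA, pvLoopUpF, pvPassUpA_eq d]
      cases hb : (pvPassUpF d).2 <;> simp [ih]

-- ---- indexed pass = functional pass, down (ducks and movs in lockstep) ----
lemma pvStepD_cons (x mx : Int) (d m : List Int) (b : Bool) (i : Nat) :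
    pvStepD (x :: d, (mx :: m, b)) (i+1) =
      (x :: (pvStepD (d, (m, b)) i).1,
       (mx :: (pvStepD (d, (m, b)) i).2.1, (pvStepD (d, (m, b)) i).2.2)) := by
  simp only [pvStepD, List.getD_cons_succ, List.set_cons_succ]
  split_ifs <;> rfl

lemma pvStepD_shift (is : List Nat) : ∀ (x mx : Int) (d m : List Int) (b : Bool),
    (is.map (· + 1)).foldl pvStepD (x :: d, (mx :: m, b)) =
      (x :: (is.foldl pvStepD (d, (m, b))).1,
       (mx :: (is.foldl pvStepD (d, (m, b))).2.1, (is.foldl pvStepD (d, (m, b))).2.2)) := by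
  induction is with
  | nil => intro x mx d m b; rfl
  | cons i is ih =>
      intro x mx d m b
      simp only [List.map_cons, List.foldl_cons, pvStepD_cons]
      exact ih x mx (pvStepD (d, (m, b)) i).1 (pvStepD (d, (m, b)) i).2.1 (pvStepD (d, (m, b)) i).2.2

lemma pvPassDown_fold (t : List (Int × Int)) : ∀ (x mx : Int) (b : Bool),
    (List.range t.length).foldl pvStepD (x :: t.map Prod.fst, (mx :: t.map Prod.snd, b)) =
      ((pvDownAux (x, mx) t).1.map Prod.fst,
       ((pvDownAux (x, mx) t).1.map Prod.snd, b && !(pvDownAux (x, mx) t).2)) := by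
  induction t with
  | nil => intro x mx b; simp [pvDownAux]
  | cons q t ih =>
      intro x mx b
      obtain ⟨y, my⟩ := q
      simp only [List.map_cons, List.length_cons]
      rw [List.range_succ_eq_map]
      simp only [List.foldl_cons]
      have h0 : pvStepD (x :: y :: t.map Prod.fst, (mx :: my :: t.map Prod.snd, b)) 0 =
          if x < y then
            ((x + PySem.Int.floordiv (y - x + 1) 2) :: (y - PySem.Int.floordiv (y - x + 1) 2) :: t.map Prod.fst,
             ((mx + PySem.Int.floordiv (y - x + 1) 2) :: my :: t.map Prod.snd, false))
          else (x :: y :: t.map Prod.fst, (mx :: my :: t.map Prod.snd, b)) := by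
        simp only [pvStepD]
        split_ifs <;> first | rfl | simp_all
      rw [h0]
      have hsucc : (List.range t.length).map Nat.succ
          = (List.range t.length).map (· + 1) := by simp
      by_cases hxy : x < y
      · simp only [if_pos hxy]
        rw [hsucc, pvStepD_shift]
        rw [ih (y - PySem.Int.floordiv (y - x + 1) 2) my false]
        simp [pvDownAux, hxy]
      · simp only [if_neg hxy]
        rw [hsucc, pvStepD_shift]
        rw [ih y my b]
        simp [pvDownAux, hxy]

lemma pvPassDownA_eq (P : List (Int × Int)) :
    pvPassDownA (P.map Prod.fst) (P.map Prod.snd) =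
      ((pvPassDownF P).1.map Prod.fst, ((pvPassDownF P).1.map Prod.snd, !(pvPassDownF P).2)) := by
  cases P with
  | nil => rfl
  | cons p t =>
      obtain ⟨x, mx⟩ := p
      have := pvPassDown_fold t x mx true
      simpa [pvPassDownA, pvPassDownF] using this

lemma pvLoopDown_eq : ∀ (f : Nat) (P : List (Int × Int)),
    pvLoopDownA f (P.map Prod.fst) (P.map Prod.snd) =
      ((pvLoopDownF f P).map Prod.fst, (pvLoopDownF f P).map Prod.snd) := by
  intro f
  induction f with
  | zero => intro P; rfl
  | succ f ih =>
      intro P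
      simp only [pvLoopDownA, pvLoopDownF, pvPassDownA_eq P]
      cases hb : (pvPassDownF P).2 <;> simp [ih]

-- ---- invariants of one functional phase-1 pass ----
lemma pvSmoothAux_length (rest : List Int) : ∀ x, (pvSmoothAux x rest).1.length = rest.length + 1 := by
  induction rest with
  | nil => intro x; simp [pvSmoothAux]
  | cons y t ih =>
      intro x
      by_cases h : y < x <;> simp [pvSmoothAux, h, ih]

lemma pvSmoothAux_sum (rest : List Int) : ∀ x, (pvSmoothAux x rest).1.sum = x + rest.sum := by
  induction rest with
  | nil => intro x; simp [pvSmoothAux]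
  | cons y t ih =>
      intro x
      by_cases h : y < x <;> simp [pvSmoothAux, h, ih] <;> ring

lemma pvSmoothAux_prefix (rest : List Int) : ∀ x k,
    ((pvSmoothAux x rest).1.take k).sum ≤ ((x :: rest).take k).sum := by
  induction rest with
  | nil => intro x k; simp [pvSmoothAux]
  | cons y t ih =>
      intro x k
      by_cases h : y < x
      · simp only [pvSmoothAux, if_pos h]
        cases k with
        | zero => simp
        | succ j =>
            simp only [List.take_succ_cons, List.sum_cons]
            cases j with
            | zero => simp
            | succ i =>
                have h1 := ih (y + 1) (i + 1)
                simp only [List.take_succ_cons, List.sum_cons] at h1 ⊢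
                omega
      · simp only [pvSmoothAux, if_neg h]
        cases k with
        | zero => simp
        | succ j =>
            have h1 := ih y j
            simp only [List.take_succ_cons, List.sum_cons]
            omega

lemma pvSmoothAux_not_moved (rest : List Int) : ∀ x, (pvSmoothAux x rest).2 = false →
    (pvSmoothAux x rest).1 = x :: rest ∧ List.IsChain (· ≤ ·) (x :: rest) := by
  induction rest with
  | nil => intro x _; simp [pvSmoothAux]
  | cons y t ih =>
      intro x h
      by_cases hyx : y < x
      · simp [pvSmoothAux, hyx] at h
      · simp only [pvSmoothAux, if_neg hyx] at h ⊢
        obtain ⟨h1, h2⟩ := ih y h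
        refine ⟨by simp [h1], ?_⟩
        exact List.isChain_cons_cons.mpr ⟨by omega, h2⟩

-- ---- phase-2 flag analysis on the indexed pass ----
lemma pvStep2_flag_false (is : List Nat) : ∀ s : List Int × Bool, s.2 = false →
    (is.foldl pvStep2 s).2 = false := by
  induction is with
  | nil => intro s hs; exact hs
  | cons i is ih =>
      intro s hs
      simp only [List.foldl_cons]
      apply ih
      simp only [pvStep2]
      split_ifs <;> simp [hs]

lemma pvStep2_done (is : List Nat) : ∀ (d : List Int) (b : Bool),
    (is.foldl pvStep2 (d, b)).2 = true →
    (is.foldl pvStep2 (d, b) = (d, b) ∧ ∀ i ∈ is, ¬(d.getD i 0 < d.getD (i+1) 0)) := by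
  induction is with
  | nil => intro d b _; simp
  | cons i is ih =>
      intro d b h
      by_cases hf : d.getD i 0 < d.getD (i+1) 0
      · exfalso
        have hstep : (pvStep2 (d, b) i).2 = false := by
          simp only [pvStep2]
          rw [if_pos hf]
        have := pvStep2_flag_false is (pvStep2 (d, b) i) hstep
        simp only [List.foldl_cons] at h
        rw [h] at this
        exact Bool.true_eq_false.mp this
      · have hstep : pvStep2 (d, b) i = (d, b) := by
          simp only [pvStep2]
          rw [if_neg hf]
        simp only [List.foldl_cons, hstep] at h ⊢
        obtain ⟨h1, h2⟩ := ih d b h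
        exact ⟨h1, by
          intro j hj
          rcases List.mem_cons.mp hj with rfl | hj'
          · exact hf
          · exact h2 j hj'⟩

-- ---- a constant phase-1 fixed point contradicts Pre_ ----
lemma pvConstant_of_flat (d : List Int) (c : Int)
    (hc : d.getD 0 0 = c)
    (h : ∀ i : Nat, i + 1 < d.length → d.getD i 0 = d.getD (i+1) 0) :
    d = List.replicate d.length c := by
  have key : ∀ i, i < d.length → d.getD i 0 = c := by
    intro i
    induction i with
    | zero => intro _; exact hc
    | succ j ihj =>
        intro hj
        have hstep := h j (by omega)
        rw [← hstep]
        exact ihj (by omega)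
  apply List.ext_getElem (by simp)
  intro i h1 h2
  have hk := key i h1
  rw [List.getD_eq_getElem d 0 h1] at hk
  simpa using hk

-- ---- loop-unfolding helpers for A's trampoline ----
lemma pvLoopA_step (f : Nat) (ph : Ph) (d : List Int) (out : Int) (h : ¬ ph = Ph.p2) :
    pvLoopA Ph.p2 (f+1) ph d out = pvLoopA Ph.p2 f (pvStepA ph d).1 (pvStepA ph d).2 (out + 1) := by
  simp only [pvLoopA]
  rw [if_neg h]

lemma pvLoopA_exit (f : Nat) (d : List Int) (out : Int) :
    pvLoopA Ph.p2 (f+1) Ph.p2 d out = out - 1 := by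
  simp [pvLoopA]

-- ---- the bridge: A's trampoline equals the functional counting loop, pass for pass ----
lemma pvBridge (d0 : List Int) (hpre : Pre_ducks_settle_fast d0) :
    ∀ (F : Nat) (d : List Int) (out : Int),
      d.length = d0.length → d.sum = d0.sum →
      (∀ k, ((d.take k).sum ≤ ((d0.take k).sum))) →
      pvLoopA Ph.p2 (F+1) Ph.p1 d out = pvCountF F d out := by
  intro F
  induction F with
  | zero =>
      intro d out _ _ _
      rw [pvLoopA_step 0 Ph.p1 d out (by decide)]
      simp only [pvLoopA, pvCountF]
      omega
  | succ F ih =>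
      intro d out hlen hsum hpref
      obtain ⟨hn, hnot⟩ := hpre
      cases d with
      | nil => simp at hlen; omega
      | cons x rest =>
        have hp1 := pvPass1A_eq (x :: rest)
        by_cases hm : (pvSmoothAux x rest).2
        · -- the pass moved: both loops advance by one pass
          have hstep : pvStepA Ph.p1 (x :: rest) = (Ph.p1, (pvSmoothAux x rest).1) := by
            simp [pvStepA, hp1, pvPassSmooth, hm]
          have hL : pvLoopA Ph.p2 (F+1+1) Ph.p1 (x :: rest) out
              = pvLoopA Ph.p2 (F+1) Ph.p1 (pvSmoothAux x rest).1 (out + 1) := by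
            rw [pvLoopA_step (F+1) Ph.p1 (x :: rest) out (by decide), hstep]
          have hR : pvCountF (F+1) (x :: rest) out
              = pvCountF F (pvSmoothAux x rest).1 (out + 1) := by
            simp [pvCountF, pvPassSmooth, hm]
          rw [hL, hR]
          apply ih
          · rw [pvSmoothAux_length]; simpa using hlen
          · rw [pvSmoothAux_sum]; simpa using hsum
          · intro k
            exact le_trans (pvSmoothAux_prefix rest x k) (hpref k)
        · -- the pass did not move: phase1 is at a fixed point, phase2 must move
          have hm' : (pvSmoothAux x rest).2 = false := by
            simpa using hm
          obtain ⟨heq, hchain⟩ := pvSmoothAux_not_moved rest x hm'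
          have hflag : (pvPass2A (pvSmoothAux x rest).1).2 = false := by
            rw [heq]
            by_contra htrue
            have htrue2 : (pvPass2A (x :: rest)).2 = true := by
              simpa using htrue
            rw [pvPass2A] at htrue2
            obtain ⟨_, hnofire⟩ := pvStep2_done (List.range ((x :: rest).length - 1)) (x :: rest) true htrue2
            -- with the chain, no strict rise anywhere means the list is constant
            set d := x :: rest with hd
            have hflat : ∀ i : Nat, i + 1 < d.length → d.getD i 0 = d.getD (i+1) 0 := by
              intro i hi
              have hmem : i ∈ List.range (d.length - 1) := List.mem_range.mpr (by omega)
              have hnlt := hnofire i hmem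
              have hle : d.getD i 0 ≤ d.getD (i+1) 0 := by
                have := List.isChain_iff_getElem.mp hchain i (by simpa using hi)
                rw [List.getD_eq_getElem d 0 (by omega), List.getD_eq_getElem d 0 (by omega)]
                simpa using this
              omega
            have hconst := pvConstant_of_flat d (d.getD 0 0) rfl hflat
            -- contradiction with Pre_ via the carried invariants
            apply hnot
            set c := d.getD 0 0 with hcdef
            set n := d0.length with hndef
            have hlen' : d.length = n := hlen
            have hsumd : d.sum = (n : Int) * c := by
              rw [hconst]
              simp [hlen']
            have hdvd : (n : Int) ∣ d0.sum := ⟨c, by rw [← hsum, hsumd]⟩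
            have havg : d0.sum / (n : Int) = c := by
              rw [← hsum, hsumd]
              exact Int.mul_ediv_cancel_left c (by positivity)
            refine ⟨hdvd, ?_⟩
            intro k hk
            rw [havg]
            have htake : ((d.take k).sum) = (k : Int) * c := by
              rw [hconst, List.take_replicate, hlen']
              have : min k n = k := by omega
              rw [this]
              simp
            have := hpref k
            rw [htake] at this
            exact this
          -- A: one more trampoline call lands in phase p2 and the loop exits with `out`
          have hstep : pvStepA Ph.p1 (x :: rest)
              = (Ph.p2, (pvPass2A (pvSmoothAux x rest).1).1) := by
            simp [pvStepA, hp1, pvPassSmooth, hm', hflag]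
          have hL : pvLoopA Ph.p2 (F+1+1) Ph.p1 (x :: rest) out = out := by
            rw [pvLoopA_step (F+1) Ph.p1 (x :: rest) out (by decide), hstep]
            rw [pvLoopA_exit]
            omega
          have hR : pvCountF (F+1) (x :: rest) out = out := by
            simp [pvCountF, pvPassSmooth, hm']
          rw [hL, hR]

-- map snd of the initial (value, 0) pairs is the zero movs list
lemma pvPairs_fst (d : List Int) : (d.map (fun v => (v, (0 : Int)))).map Prod.fst = d := by
  simp [Function.comp_def]

lemma pvPairs_snd (d : List Int) :
    (d.map (fun v => (v, (0 : Int)))).map Prod.snd = List.replicate d.length 0 := by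
  induction d with
  | nil => rfl
  | cons x t ih => simp [ih, List.replicate_succ]

-- ===== functional passes = prefix-sum scans =====

-- floor-division bracket, usable by omega
lemma pvFd2 (a : Int) : 2 * PySem.Int.floordiv a 2 ≤ a ∧ a < 2 * PySem.Int.floordiv a 2 + 2 := by
  rw [PySem.Int.floordiv_eq_ediv_of_pos (by norm_num)]
  omega

lemma pvPSum_inj : ∀ (l1 l2 : List Int) (q : Int), pvPSum q l1 = pvPSum q l2 → l1 = l2 := by
  intro l1
  induction l1 with
  | nil => intro l2 q h; cases l2 <;> simp [pvPSum] at h ⊢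
  | cons x t ih =>
      intro l2 q h
      cases l2 with
      | nil => simp [pvPSum] at h
      | cons y s =>
          simp only [pvPSum, List.cons.injEq] at h
          obtain ⟨h1, h2⟩ := h
          have hxy : x = y := by omega
          subst hxy
          exact by rw [ih s (q + x) h2]

lemma pvScan1_bridge : ∀ (t : List Int) (prev q : Int),
    pvScan1Aux q (pvPSum q (prev :: t)) = pvPSum q ((pvSmoothAux prev t).1) := by
  intro t
  induction t with
  | nil => intro prev q; simp [pvPSum, pvScan1Aux, pvSmoothAux]
  | cons y t ih =>
      intro prev q
      simp only [pvPSum, pvScan1Aux, pvSmoothAux]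
      by_cases h : y < prev
      · have hc : q + (q + prev + y) < 2 * (q + prev) := by omega
        rw [if_pos hc, if_pos h]
        have hmid : q + prev - 1 + (y + 1) = q + prev + y := by ring
        have hrec := ih (y + 1) (q + prev - 1)
        simp only [pvPSum, hmid] at hrec
        simp only [pvPSum]
        rw [show q + (prev - 1) = q + prev - 1 by ring, hrec]
      · have hc : ¬(q + (q + prev + y) < 2 * (q + prev)) := by omega
        rw [if_neg hc, if_neg h]
        have := ih y (q + prev)
        simp only [pvPSum] at this
        simp only [pvPSum]
        rw [this]

lemma pvScanUp_bridge : ∀ (t : List Int) (prev q : Int),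
    pvScanUpAux q (pvPSum q (prev :: t)) = pvPSum q ((pvUpAux prev t).1) := by
  intro t
  induction t with
  | nil => intro prev q; simp [pvPSum, pvScanUpAux, pvUpAux]
  | cons y t ih =>
      intro prev q
      simp only [pvPSum, pvScanUpAux, pvUpAux]
      by_cases h : prev > y
      · rw [if_pos h]
        have hd := pvFd2 (prev - y + 1)
        have hq := pvFd2 (q + (q + prev + y))
        set d := PySem.Int.floordiv (prev - y + 1) 2 with hdd
        have ho : min (q + prev) (PySem.Int.floordiv (q + (q + prev + y)) 2) = q + prev - d := by
          omega
        rw [ho]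
        have h2 : q + prev - d + (y + d) = q + prev + y := by ring
        have hrec := ih (y + d) (q + prev - d)
        simp only [pvPSum, h2] at hrec
        simp only [pvPSum]
        rw [show q + (prev - d) = q + prev - d by ring, hrec]
      · rw [if_neg h]
        have hq := pvFd2 (q + (q + prev + y))
        have ho : min (q + prev) (PySem.Int.floordiv (q + (q + prev + y)) 2) = q + prev := by
          omega
        rw [ho]
        have := ih y (q + prev)
        simp only [pvPSum] at this
        simp only [pvPSum]
        rw [this]

lemma pvScanDown_bridge : ∀ (t : List (Int × Int)) (p : Int × Int) (q : Int),
    pvScanDownAux q (pvPSum q (p.1 :: t.map Prod.fst)) = pvPSum q (((pvDownAux p t).1).map Prod.fst) := by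
  intro t
  induction t with
  | nil => intro p q; simp [pvPSum, pvScanDownAux, pvDownAux]
  | cons yp t ih =>
      intro p q
      obtain ⟨y, my⟩ := yp
      simp only [List.map_cons, pvPSum, pvScanDownAux, pvDownAux]
      by_cases h : p.1 < y
      · rw [if_pos h]
        have hd := pvFd2 (y - p.1 + 1)
        have hq := pvFd2 (-(q + (q + p.1 + y)))
        set d := PySem.Int.floordiv (y - p.1 + 1) 2 with hdd
        have ho : max (q + p.1) (-(PySem.Int.floordiv (-(q + (q + p.1 + y))) 2)) = q + p.1 + d := by
          omega
        rw [ho]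
        have h2 : q + p.1 + d + (y - d) = q + p.1 + y := by ring
        have hrec := ih (y - d, my) (q + p.1 + d)
        simp only [List.map_cons, pvPSum, h2] at hrec
        simp only [List.map_cons, pvPSum]
        rw [show q + (p.1 + d) = q + p.1 + d by ring, hrec]
      · rw [if_neg h]
        have hq := pvFd2 (-(q + (q + p.1 + y)))
        have ho : max (q + p.1) (-(PySem.Int.floordiv (-(q + (q + p.1 + y))) 2)) = q + p.1 := by
          omega
        rw [ho]
        have := ih (y, my) (q + p.1)
        simp only [List.map_cons, pvPSum] at this
        simp only [List.map_cons, pvPSum]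
        rw [this]

-- moved flag ↔ the pass changed the list
lemma pvSmoothAux_moved_ne : ∀ (t : List Int) (x : Int),
    (pvSmoothAux x t).2 = true → (pvSmoothAux x t).1 ≠ x :: t := by
  intro t
  induction t with
  | nil => intro x h; simp [pvSmoothAux] at h
  | cons y t ih =>
      intro x h
      by_cases hyx : y < x
      · simp only [pvSmoothAux, if_pos hyx]
        intro hc
        have := (List.cons.injEq _ _ _ _).mp hc
        omega
      · simp only [pvSmoothAux, if_neg hyx] at h ⊢
        intro hc
        have := (List.cons.injEq _ _ _ _).mp hc
        exact ih y h this.2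

lemma pvUpAux_not_moved : ∀ (t : List Int) (x : Int),
    (pvUpAux x t).2 = false → (pvUpAux x t).1 = x :: t := by
  intro t
  induction t with
  | nil => intro x _; simp [pvUpAux]
  | cons y t ih =>
      intro x h
      by_cases hxy : x > y
      · simp [pvUpAux, hxy] at h
      · simp only [pvUpAux, if_neg hxy] at h ⊢
        rw [ih y h]

lemma pvUpAux_moved_ne : ∀ (t : List Int) (x : Int),
    (pvUpAux x t).2 = true → (pvUpAux x t).1 ≠ x :: t := by
  intro t
  induction t with
  | nil => intro x h; simp [pvUpAux] at h
  | cons y t ih =>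
      intro x h
      by_cases hxy : x > y
      · simp only [pvUpAux, if_pos hxy]
        intro hc
        have hd := pvFd2 (x - y + 1)
        have := (List.cons.injEq _ _ _ _).mp hc
        omega
      · simp only [pvUpAux, if_neg hxy] at h ⊢
        intro hc
        have := (List.cons.injEq _ _ _ _).mp hc
        exact ih y h this.2

lemma pvDownAux_not_moved : ∀ (t : List (Int × Int)) (p : Int × Int),
    (pvDownAux p t).2 = false → (pvDownAux p t).1 = p :: t := by
  intro t
  induction t with
  | nil => intro p _; simp [pvDownAux]
  | cons yp t ih =>
      intro p h
      by_cases hxy : p.1 < yp.1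
      · simp [pvDownAux, hxy] at h
      · simp only [pvDownAux, if_neg hxy] at h ⊢
        rw [ih yp h]

lemma pvDownAux_moved_ne : ∀ (t : List (Int × Int)) (p : Int × Int),
    (pvDownAux p t).2 = true → ((pvDownAux p t).1).map Prod.fst ≠ (p :: t).map Prod.fst := by
  intro t
  induction t with
  | nil => intro p h; simp [pvDownAux] at h
  | cons yp t ih =>
      intro p h
      by_cases hxy : p.1 < yp.1
      · simp only [pvDownAux, if_pos hxy, List.map_cons]
        intro hc
        have hd := pvFd2 (yp.1 - p.1 + 1)
        have := (List.cons.injEq _ _ _ _).mp hc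
        omega
      · simp only [pvDownAux, if_neg hxy] at h ⊢
        simp only [List.map_cons]
        intro hc
        have := (List.cons.injEq _ _ _ _).mp hc
        exact ih yp h this.2

-- ---- loop lockstep: count ----
lemma pvCount_eq : ∀ (f : Nat) (d : List Int) (s : Int),
    pvCountP f (0 :: pvPSum 0 d) s = pvCountF f d s := by
  intro f
  induction f with
  | zero => intro d s; rfl
  | succ f ih =>
      intro d s
      cases d with
      | nil => simp [pvCountP, pvCountF, pvScan1, pvScan1Aux, pvPSum, pvPassSmooth]
      | cons x t =>
          have hb := pvScan1_bridge t x 0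
          simp only [pvCountP, pvCountF, pvScan1, pvPassSmooth]
          rw [hb]
          by_cases hm : (pvSmoothAux x t).2
          · have hne : (pvSmoothAux x t).1 ≠ x :: t := pvSmoothAux_moved_ne t x hm
            have hne2 : (0 :: pvPSum 0 (pvSmoothAux x t).1) ≠ (0 :: pvPSum 0 (x :: t)) := by
              intro hc
              exact hne (pvPSum_inj _ _ 0 (by simpa using hc))
            rw [if_neg hne2, hm]
            simp only [if_true]
            exact ih (pvSmoothAux x t).1 (s + 1)
          · have hm' : (pvSmoothAux x t).2 = false := by simpa using hm
            obtain ⟨heq, _⟩ := pvSmoothAux_not_moved t x hm'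
            rw [heq, hm']
            simp
  
-- ---- loop lockstep: up ----
lemma pvFixUp_eq : ∀ (f : Nat) (d : List Int),
    pvFixUp f (0 :: pvPSum 0 d) = 0 :: pvPSum 0 (pvLoopUpF f d) := by
  intro f
  induction f with
  | zero => intro d; rfl
  | succ f ih =>
      intro d
      cases d with
      | nil => simp [pvFixUp, pvLoopUpF, pvScanUp, pvScanUpAux, pvPSum, pvPassUpF]
      | cons x t =>
          have hb := pvScanUp_bridge t x 0
          simp only [pvFixUp, pvLoopUpF, pvScanUp, pvPassUpF]
          rw [hb]
          by_cases hm : (pvUpAux x t).2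
          · have hne : (pvUpAux x t).1 ≠ x :: t := pvUpAux_moved_ne t x hm
            have hne2 : (0 :: pvPSum 0 (pvUpAux x t).1) ≠ (0 :: pvPSum 0 (x :: t)) := by
              intro hc
              exact hne (pvPSum_inj _ _ 0 (by simpa using hc))
            rw [if_neg hne2, hm]
            simp only [if_true]
            exact ih (pvUpAux x t).1
          · have hm' : (pvUpAux x t).2 = false := by simpa using hm
            have heq := pvUpAux_not_moved t x hm'
            rw [heq, hm']
            simp

-- ---- loop lockstep: down (values side) ----
lemma pvFixDown_eq : ∀ (f : Nat) (P : List (Int × Int)),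
    pvFixDown f (0 :: pvPSum 0 (P.map Prod.fst)) = 0 :: pvPSum 0 ((pvLoopDownF f P).map Prod.fst) := by
  intro f
  induction f with
  | zero => intro P; rfl
  | succ f ih =>
      intro P
      cases P with
      | nil => simp [pvFixDown, pvLoopDownF, pvScanDown, pvScanDownAux, pvPSum, pvPassDownF]
      | cons p t =>
          have hb := pvScanDown_bridge t p 0
          simp only [pvFixDown, pvLoopDownF, pvScanDown, pvPassDownF, List.map_cons]
          simp only [List.map_cons] at hb
          rw [hb]
          by_cases hm : (pvDownAux p t).2
          · have hne : ((pvDownAux p t).1).map Prod.fst ≠ (p :: t).map Prod.fst :=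
              pvDownAux_moved_ne t p hm
            have hne2 : (0 :: pvPSum 0 (((pvDownAux p t).1).map Prod.fst))
                ≠ (0 :: pvPSum 0 (p.1 :: t.map Prod.fst)) := by
              intro hc
              apply hne
              have := pvPSum_inj _ _ 0 (by simpa using hc)
              simpa using this
            rw [if_neg hne2, hm]
            simp only [if_true]
            exact ih (pvDownAux p t).1
          · have hm' : (pvDownAux p t).2 = false := by simpa using hm
            have heq := pvDownAux_not_moved t p hm'
            rw [heq, hm']
            simp

-- ---- movs by conservation: one pass ----
lemma pvDownAux_movs : ∀ (t : List (Int × Int)) (p : Int × Int) (q : Int),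
    ((pvDownAux p t).1).map Prod.snd
      = List.zipWith (· + ·) ((p :: t).map Prod.snd)
          (List.zipWith (fun a b => a - b) (pvPSum q (((pvDownAux p t).1).map Prod.fst))
            (pvPSum q ((p :: t).map Prod.fst))) := by
  intro t
  induction t with
  | nil => intro p q; simp [pvDownAux, pvPSum, sub_self]
  | cons yp t ih =>
      intro p q
      obtain ⟨y, my⟩ := yp
      by_cases h : p.1 < y
      · simp only [pvDownAux, if_pos h, List.map_cons, pvPSum, List.zipWith_cons_cons,
          List.cons.injEq]
        set d := PySem.Int.floordiv (y - p.1 + 1) 2 with hdd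
        refine ⟨by ring, ?_⟩
        have h2 : q + (p.1 + d) + (y - d) = q + p.1 + y := by ring
        have hrec := ih (y - d, my) (q + (p.1 + d))
        simp only [List.map_cons, pvPSum, h2] at hrec
        exact hrec
      · simp only [pvDownAux, if_neg h, List.map_cons, pvPSum, List.zipWith_cons_cons,
          List.cons.injEq]
        exact ⟨by ring, ih (y, my) (q + p.1)⟩

-- lengths
lemma pvDownAux_length : ∀ (t : List (Int × Int)) (p : Int × Int),
    ((pvDownAux p t).1).length = t.length + 1 := by
  intro t
  induction t with
  | nil => intro p; simp [pvDownAux]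
  | cons yp t ih =>
      intro p
      by_cases h : p.1 < yp.1 <;> simp [pvDownAux, h, ih]

lemma pvPassDownF_length (P : List (Int × Int)) :
    ((pvPassDownF P).1).length = P.length := by
  cases P with
  | nil => rfl
  | cons p t => simp [pvPassDownF, pvDownAux_length]

lemma pvLoopDownF_length : ∀ (f : Nat) (P : List (Int × Int)),
    (pvLoopDownF f P).length = P.length := by
  intro f
  induction f with
  | zero => intro P; rfl
  | succ f ih =>
      intro P
      simp only [pvLoopDownF]
      cases hb : (pvPassDownF P).2 <;> simp [ih, pvPassDownF_length]

lemma pvPSum_length : ∀ (l : List Int) (q : Int), (pvPSum q l).length = l.length := by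
  intro l
  induction l with
  | nil => intro q; rfl
  | cons x t ih => intro q; simp [pvPSum, ih]

-- zip algebra: zero delta and telescoping
lemma pvZip_zero : ∀ (P : List (Int × Int)) (q : Int),
    List.zipWith (· + ·) (P.map Prod.snd)
      (List.zipWith (fun a b => a - b) (pvPSum q (P.map Prod.fst)) (pvPSum q (P.map Prod.fst))) = P.map Prod.snd := by
  intro P
  induction P with
  | nil => intro q; rfl
  | cons p t ih =>
      intro q
      simp only [List.map_cons, pvPSum, List.zipWith_cons_cons, List.cons.injEq]
      exact ⟨by ring, ih (q + p.1)⟩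

lemma pvZip_telescope : ∀ (m A B C : List Int),
    A.length = m.length → B.length = m.length → C.length = m.length →
    List.zipWith (· + ·) (List.zipWith (· + ·) m (List.zipWith (fun a b => a - b) B A)) (List.zipWith (fun a b => a - b) C B)
      = List.zipWith (· + ·) m (List.zipWith (fun a b => a - b) C A) := by
  intro m
  induction m with
  | nil => intro A B C hA hB hC; simp
  | cons x m ih =>
      intro A B C hA hB hC
      cases A with | nil => simp at hA | cons a A =>
      cases B with | nil => simp at hB | cons b B =>
      cases C with | nil => simp at hC | cons c C =>
      simp only [List.zipWith_cons_cons, List.cons.injEq]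
      exact ⟨by ring, ih A B C (by simpa using hA) (by simpa using hB) (by simpa using hC)⟩

-- movs over the whole loop
lemma pvLoopDownF_movs : ∀ (f : Nat) (P : List (Int × Int)) (q : Int),
    (pvLoopDownF f P).map Prod.snd
      = List.zipWith (· + ·) (P.map Prod.snd)
          (List.zipWith (fun a b => a - b) (pvPSum q ((pvLoopDownF f P).map Prod.fst))
            (pvPSum q (P.map Prod.fst))) := by
  intro f
  induction f with
  | zero => intro P q; exact (pvZip_zero P q).symm
  | succ f ih =>
      intro P q
      simp only [pvLoopDownF]
      cases hb : (pvPassDownF P).2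
      · -- no move: list unchanged
        cases P with
        | nil => simp [pvPassDownF, pvPSum]
        | cons p t =>
            simp only [pvPassDownF] at hb ⊢
            rw [pvDownAux_not_moved t p hb]
            exact (pvZip_zero (p :: t) q).symm
      · -- moved: compose the one-pass delta with the rest of the loop
        simp only [if_true]
        cases P with
        | nil => simp [pvPassDownF] at hb
        | cons p t =>
            simp only [pvPassDownF] at hb ⊢
            have h1 := ih (pvDownAux p t).1 q
            have h2 := pvDownAux_movs t p q
            rw [h1, h2]
            apply pvZip_telescope
            · rw [pvPSum_length]; simp
            · rw [pvPSum_length, List.length_map, pvDownAux_length]; simp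
            · rw [pvPSum_length, List.length_map, pvLoopDownF_length, pvDownAux_length]; simp

-- zipWith (+) over an all-zero left column
lemma pvZip_zero_left : ∀ (X : List Int) (n : Nat), X.length = n →
    List.zipWith (· + ·) (List.replicate n (0 : Int)) X = X := by
  intro X
  induction X with
  | nil => intro n h; simp
  | cons x t ih =>
      intro n h
      cases n with
      | zero => simp at h
      | succ n =>
          simp only [List.replicate_succ, List.zipWith_cons_cons, List.cons.injEq]
          exact ⟨by ring, ih n (by simpa using h)⟩

-- ===== VERDICT (by name: the statement is the Claim_ definition above) =====
theorem ducks_settle_fast_spec : Claim_equal_ducks_settle_fast := by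
  intro ducks _ hpre
  unfold Spec_ducks_settle_fast
  unfold ducks_settle_fast ducks_settle_fast_alt pvDucksSettleA
  -- phase-1 count
  have hsteps : pvLoopA Ph.p2 (pvFuel ducks + 1) Ph.p1 ducks 0
      = pvCountP (pvFuel ducks) (0 :: pvPSum 0 ducks) 0 := by
    rw [pvBridge ducks hpre (pvFuel ducks) ducks 0 rfl rfl (fun k => le_refl _)]
    exact (pvCount_eq (pvFuel ducks) ducks 0).symm
  -- up loop
  have hup : pvLoopUpA (pvFuel ducks) ducks = pvLoopUpF (pvFuel ducks) ducks :=
    pvLoopUp_eq (pvFuel ducks) ducks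
  set d1 := pvLoopUpF (pvFuel ducks) ducks with hd1
  have hU : pvFixUp (pvFuel ducks) (0 :: pvPSum 0 ducks) = 0 :: pvPSum 0 d1 :=
    pvFixUp_eq (pvFuel ducks) ducks
  -- down loop, A side via the pairs representation
  set P0 := d1.map (fun v => (v, (0 : Int))) with hP0
  have hAdown := pvLoopDown_eq (pvFuel ducks) P0
  rw [hP0, pvPairs_fst, pvPairs_snd] at hAdown
  set F := pvLoopDownF (pvFuel ducks) P0 with hF
  -- A's movs list equals the prefix-sum difference list
  have hmovs : F.map Prod.snd
      = List.zipWith (fun a b => a - b) (pvPSum 0 (F.map Prod.fst)) (pvPSum 0 d1) := by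
    have h1 := pvLoopDownF_movs (pvFuel ducks) P0 0
    rw [← hF] at h1
    rw [hP0, pvPairs_fst, pvPairs_snd] at h1
    rw [h1]
    apply pvZip_zero_left
    have hFlen : F.length = d1.length := by
      rw [hF, pvLoopDownF_length, hP0, List.length_map]
    rw [List.length_zipWith, pvPSum_length, pvPSum_length, List.length_map, hFlen]
    omega
  -- B's D list
  have hD : pvFixDown (pvFuel ducks) (0 :: pvPSum 0 d1) = 0 :: pvPSum 0 (F.map Prod.fst) := by
    have := pvFixDown_eq (pvFuel ducks) P0
    rw [hP0, pvPairs_fst] at this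
    exact this
  simp only [hsteps, hup, hAdown, hU, hD, List.tail_cons, hmovs]
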